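-- pv_equiv track=rewrite | github.com/IngridAr21/AI-Assistant | src/main/python/ruleBasedTodo.py | contains_modal
-- ===== SOURCE A (Python) =====
-- def contains_modal(sentence: str) -> bool:
--     modal_verbs = ["can", "could", "may", "might", "must", "shall", "should", "will", "would"]
--     modal_contractions = ["can't", "couldn't", "mayn't", "mightn't", "mustn't", "shan't", "shouldn't", "won't", "wouldn't"]
--     for modal in modal_verbs:
--         if f" {modal} " in sentence.lower():
--             return True
--     for contraction in modal_contractions:
--         if f" {contraction} " in sentence.lower():
--             return True
--     return False
-- ===== SOURCE B (Python) =====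
-- _MODALS = frozenset(
--     "can could may might must shall should will would "
--     "can't couldn't mayn't mightn't mustn't shan't shouldn't won't wouldn't".split(' ')
-- )
--
--
-- def contains_modal(sentence: str) -> bool:
--     parts = sentence.lower().split(' ')
--     return any(tok in _MODALS for tok in parts[1:-1])
-- ===== Notes on version B (the rewrite author's own statement) =====
-- stated objective: idiomatic
-- what changed: Replaced A's 18 separate space-delimited substring scans (each recomputing sentence.lower()) by lowercasing once, splitting on literal single spaces, and testing the interior tokens parts[1:-1] against one frozenset of the 18 modal words.
import Mathlib
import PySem

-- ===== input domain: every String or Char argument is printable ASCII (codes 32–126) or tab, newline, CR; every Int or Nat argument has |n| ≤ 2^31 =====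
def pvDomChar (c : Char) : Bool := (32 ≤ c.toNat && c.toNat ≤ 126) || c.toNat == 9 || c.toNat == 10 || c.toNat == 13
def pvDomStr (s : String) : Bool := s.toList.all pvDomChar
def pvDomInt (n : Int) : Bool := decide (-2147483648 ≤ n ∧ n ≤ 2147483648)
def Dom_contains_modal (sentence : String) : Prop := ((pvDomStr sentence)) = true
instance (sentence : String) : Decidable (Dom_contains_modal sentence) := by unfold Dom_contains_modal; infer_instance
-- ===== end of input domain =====

-- B lowercases once, splits the sentence on literal single spaces, and tests the interior
-- tokens (parts[1:-1]) against one set of the 18 modal words, instead of A's 18 separate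
-- " word "-substring scans each re-lowercasing the sentence (objective: idiomatic).

-- ===== PORT A =====
def cmModalVerbs : List (List Char) :=
  ["can".toList, "could".toList, "may".toList, "might".toList, "must".toList,
   "shall".toList, "should".toList, "will".toList, "would".toList]

def cmModalContractions : List (List Char) :=
  ["can't".toList, "couldn't".toList, "mayn't".toList, "mightn't".toList, "mustn't".toList,
   "shan't".toList, "shouldn't".toList, "won't".toList, "wouldn't".toList]

-- the 'for modal in …: if f" {modal} " in sentence.lower(): return True' loop of A
def cmLoop (ws : List (List Char)) (sentence : String) : Bool :=
  match ws with
  | [] => false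
  | m :: rest =>
    if PySem.Chars.isIn (' ' :: m ++ [' ']) (PySem.Chars.lower sentence.toList) then true
    else cmLoop rest sentence

def contains_modal (sentence : String) : Bool :=
  if cmLoop cmModalVerbs sentence then true
  else if cmLoop cmModalContractions sentence then true
  else false

-- ===== PORT B =====
-- Source B's _MODALS: the 18 words obtained by splitting one literal string on spaces
def cmWords : List (List Char) :=
  ("can could may might must shall should will would can't couldn't mayn't mightn't mustn't shan't shouldn't won't wouldn't".toList).splitOn ' '

-- parts = sentence.lower().split(' '); any(tok in _MODALS for tok in parts[1:-1])
def contains_modal_alt (sentence : String) : Bool :=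
  let parts := (PySem.Chars.lower sentence.toList).splitOn ' '
  ((parts.drop 1).dropLast).any (fun tok => cmWords.contains tok)

-- ===== PRECONDITION & SPEC =====
def Spec_contains_modal (sentence : String) (out : Bool) : Prop := out = contains_modal_alt sentence
instance (sentence : String) (out : Bool) : Decidable (Spec_contains_modal sentence out) := by unfold Spec_contains_modal; infer_instance

-- ===== CLAIM (what is proved, stated in full; the proofs are below) =====
def Claim_equal_contains_modal : Prop := ∀ (sentence : String), Dom_contains_modal sentence → Spec_contains_modal sentence (contains_modal sentence)

-- ===== LEMMAS AND PROOFS =====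

-- B's word set is exactly A's two word lists concatenated
set_option maxRecDepth 4000 in
theorem cmWords_eq : cmWords = cmModalVerbs ++ cmModalContractions := by decide

-- no modal word contains a space
set_option maxRecDepth 4000 in
theorem cmWords_no_space : ∀ w ∈ cmWords, ' ' ∉ w := by decide

-- A's loop finds exactly the words w of ws with " w " an infix of the lowered sentence
theorem cmLoop_iff (ws : List (List Char)) (s : String) :
    cmLoop ws s = true ↔ ∃ w ∈ ws, (' ' :: w ++ [' ']) <:+: PySem.Chars.lower s.toList := by
  induction ws with
  | nil => simp [cmLoop]
  | cons m rest ih =>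
    simp only [cmLoop]
    by_cases h : PySem.Chars.isIn (' ' :: m ++ [' ']) (PySem.Chars.lower s.toList) = true
    · rw [if_pos h]
      exact iff_of_true rfl ⟨m, List.mem_cons_self, (PySem.Chars.isIn_iff_infix _ _).mp h⟩
    · rw [if_neg h, ih]
      have hni : ¬ (' ' :: m ++ [' ']) <:+: PySem.Chars.lower s.toList :=
        fun hx => h ((PySem.Chars.isIn_iff_infix _ _).mpr hx)
      constructor
      · rintro ⟨w, hw, hi⟩; exact ⟨w, List.mem_cons_of_mem _ hw, hi⟩
      · rintro ⟨w, hw, hi⟩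
        rcases List.mem_cons.mp hw with rfl | hw'
        · exact absurd hi hni
        · exact ⟨w, hw', hi⟩

-- every token of splitOn ' ' is spaceless
theorem cm_splitOn_no_space (l : List Char) : ∀ t ∈ l.splitOn ' ', ' ' ∉ t := by
  induction l with
  | nil => simp [List.splitOn]
  | cons c l ih =>
    by_cases hc : c = ' '
    · subst hc
      intro t ht
      rw [show (' '::l).splitOn ' ' = [] :: l.splitOn ' ' by simp [List.splitOn]] at ht
      rcases List.mem_cons.mp ht with rfl | ht'
      · simp
      · exact ih t ht'
    · intro t ht
      rw [show (c::l).splitOn ' ' = (l.splitOn ' ').modifyHead (c :: ·) by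
        simp [List.splitOn, hc]] at ht
      rcases hx : l.splitOn ' ' with _ | ⟨t0, ts⟩
      · exact absurd hx (List.splitOnP_ne_nil _ l)
      · rw [hx, List.modifyHead] at ht
        rcases List.mem_cons.mp ht with rfl | ht'
        · intro hm
          rcases List.mem_cons.mp hm with h' | h'
          · exact hc h'.symm
          · exact ih t0 (hx ▸ List.mem_cons_self) h'
        · exact ih t (hx ▸ List.mem_cons_of_mem _ ht')

-- a pattern starting with ' ' cannot begin inside a spaceless block t
theorem cm_infix_skip (t : List Char) (ht : ' ' ∉ t) (q l : List Char) :
    (' ' :: q) <:+: (t ++ l) ↔ (' ' :: q) <:+: l := by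
  induction t with
  | nil => simp
  | cons c t' ih =>
    have hc : c ≠ ' ' := fun h => ht (h ▸ List.mem_cons_self)
    rw [List.cons_append, List.infix_cons_iff]
    constructor
    · rintro (hpre | hinf)
      · rcases hpre with ⟨r, hr⟩
        simp only [List.cons_append, List.cons.injEq] at hr
        exact absurd hr.1.symm hc
      · exact (ih (fun h => ht (List.mem_cons_of_mem _ h))).mp hinf
    · intro h
      exact Or.inr ((ih (fun h => ht (List.mem_cons_of_mem _ h))).mpr h)

-- two spaceless words followed by a space in the same stream coincide
theorem cm_eq_of_append_space (tok w a b : List Char) (htok : ' ' ∉ tok) (hw : ' ' ∉ w)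
    (h : tok ++ ' ' :: a = w ++ ' ' :: b) : w = tok ∧ a = b := by
  induction tok generalizing w with
  | nil =>
    cases w with
    | nil => simpa using h
    | cons x w' =>
      simp only [List.nil_append, List.cons_append, List.cons.injEq] at h
      exact absurd (by rw [← h.1]; exact List.mem_cons_self) hw
  | cons t tok' ih =>
    cases w with
    | nil =>
      simp only [List.cons_append, List.nil_append, List.cons.injEq] at h
      exact absurd (by rw [h.1]; exact List.mem_cons_self) htok
    | cons x w' =>
      simp only [List.cons_append, List.cons.injEq] at h
      have := ih w' (fun hm => htok (List.mem_cons_of_mem _ hm))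
        (fun hm => hw (List.mem_cons_of_mem _ hm)) h.2
      exact ⟨by rw [h.1, this.1], this.2⟩

-- a non-last token of spaceless parts ↔ "w followed by a space" at the front or after a space
theorem cm_dropLast_iff (parts : List (List Char)) (hp : parts ≠ [])
    (hsp : ∀ t ∈ parts, ' ' ∉ t) (w : List Char) (hw : ' ' ∉ w) :
    w ∈ parts.dropLast ↔
      (w ++ [' ']) <+: [' '].intercalate parts ∨
      (' ' :: w ++ [' ']) <:+: [' '].intercalate parts := by
  induction parts with
  | nil => exact absurd rfl hp
  | cons t rest ih =>
    have ht : ' ' ∉ t := hsp t List.mem_cons_self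
    cases rest with
    | nil =>
      simp only [List.dropLast, List.not_mem_nil, false_iff]
      rw [show [' '].intercalate [t] = t by simp [List.intercalate]]
      rintro (hpre | hinf)
      · exact ht (hpre.subset (by simp))
      · exact ht (hinf.subset (by simp))
    | cons t2 rest' =>
      have hM : [' '].intercalate (t :: t2 :: rest') =
          t ++ ' ' :: [' '].intercalate (t2 :: rest') := by simp [List.intercalate]
      rw [hM]
      have hrest := ih (by simp) (fun x hx => hsp x (List.mem_cons_of_mem _ hx))
      constructor
      · intro hmem
        rw [show (t :: t2 :: rest').dropLast = t :: (t2 :: rest').dropLast by simp] at hmem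
        rcases List.mem_cons.mp hmem with rfl | hmem'
        · exact Or.inl ⟨[' '].intercalate (t2 :: rest'), by simp⟩
        · rcases hrest.mp hmem' with hpre | hinf
          · exact Or.inr (by
              simp only [List.cons_append]
              rw [cm_infix_skip t ht]
              exact List.infix_cons_iff.mpr (Or.inl (by simpa using hpre)))
          · exact Or.inr (by
              simp only [List.cons_append]
              rw [cm_infix_skip t ht]
              exact List.infix_cons_iff.mpr (Or.inr (by simpa only [List.cons_append] using hinf)))
      · intro h
        rw [show (t :: t2 :: rest').dropLast = t :: (t2 :: rest').dropLast by simp]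
        rcases h with hpre | hinf
        · rcases hpre with ⟨r, hr⟩
          rw [List.append_assoc, List.singleton_append] at hr
          rcases cm_eq_of_append_space w t r ([' '].intercalate (t2 :: rest')) hw ht hr with ⟨rfl, _⟩
          exact List.mem_cons_self
        · simp only [List.cons_append] at hinf
          rw [cm_infix_skip t ht] at hinf
          rcases List.infix_cons_iff.mp hinf with hpre' | hinf'
          · exact List.mem_cons_of_mem _ (hrest.mpr (Or.inl (by simpa using hpre')))
          · exact List.mem_cons_of_mem _ (hrest.mpr (Or.inr hinf'))

-- an interior token of spaceless parts ↔ " w " infix of the joined list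
theorem cm_interior_iff (parts : List (List Char)) (hp : parts ≠ [])
    (hsp : ∀ t ∈ parts, ' ' ∉ t) (w : List Char) (hw : ' ' ∉ w) :
    w ∈ (parts.drop 1).dropLast ↔ (' ' :: w ++ [' ']) <:+: [' '].intercalate parts := by
  cases parts with
  | nil => exact absurd rfl hp
  | cons t rest =>
    have ht : ' ' ∉ t := hsp t List.mem_cons_self
    cases rest with
    | nil =>
      simp only [List.drop_succ_cons, List.drop_zero, List.dropLast_nil, List.not_mem_nil,
        false_iff]
      rw [show [' '].intercalate [t] = t by simp [List.intercalate]]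
      exact fun hinf => ht (hinf.subset (by simp))
    | cons t2 rest' =>
      have hM : [' '].intercalate (t :: t2 :: rest') =
          t ++ ' ' :: [' '].intercalate (t2 :: rest') := by simp [List.intercalate]
      rw [hM]
      simp only [List.cons_append]
      rw [cm_infix_skip t ht, List.infix_cons_iff, List.drop_succ_cons, List.drop_zero]
      rw [cm_dropLast_iff (t2 :: rest') (by simp)
        (fun x hx => hsp x (List.mem_cons_of_mem _ hx)) w hw]
      constructor
      · rintro (hpre | hinf)
        · exact Or.inl (by simpa using hpre)
        · exact Or.inr hinf
      · rintro (hpre | hinf)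
        · exact Or.inl (by simpa using hpre)
        · exact Or.inr hinf

theorem cm_main (s : String) : contains_modal s = contains_modal_alt s := by
  have hjoin : [' '].intercalate (List.splitOnP (fun x => x == ' ')
      (PySem.Chars.lower s.toList)) = PySem.Chars.lower s.toList :=
    List.intercalate_splitOn _ _
  have hB : contains_modal_alt s = true ↔
      ∃ w ∈ cmWords, (' ' :: w ++ [' ']) <:+: PySem.Chars.lower s.toList := by
    rw [contains_modal_alt]
    simp only [List.any_eq_true, List.contains_iff_mem]
    constructor
    · rintro ⟨w, hwint, hwset⟩
      have hwparts : w ∈ (PySem.Chars.lower s.toList).splitOn ' ' :=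
        List.drop_subset _ _ (List.dropLast_subset _ hwint)
      have hw : ' ' ∉ w := cm_splitOn_no_space _ w hwparts
      have := (cm_interior_iff _ (List.splitOnP_ne_nil _ _)
        (cm_splitOn_no_space _) w hw).mp hwint
      rw [hjoin] at this
      exact ⟨w, hwset, this⟩
    · rintro ⟨w, hwset, hinf⟩
      have hw : ' ' ∉ w := cmWords_no_space w hwset
      refine ⟨w, (cm_interior_iff _ (List.splitOnP_ne_nil _ _)
        (cm_splitOn_no_space _) w hw).mpr ?_, hwset⟩
      rw [hjoin]
      exact hinf
  have hA : contains_modal s = true ↔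
      ∃ w ∈ cmWords, (' ' :: w ++ [' ']) <:+: PySem.Chars.lower s.toList := by
    rw [contains_modal]
    constructor
    · intro h
      split_ifs at h with h1 h2
      · rcases (cmLoop_iff _ s).mp h1 with ⟨w, hw, hinf⟩
        exact ⟨w, cmWords_eq ▸ List.mem_append_left _ hw, hinf⟩
      · rcases (cmLoop_iff _ s).mp h2 with ⟨w, hw, hinf⟩
        exact ⟨w, cmWords_eq ▸ List.mem_append_right _ hw, hinf⟩
    · rintro ⟨w, hw, hinf⟩
      rw [cmWords_eq] at hw
      rcases List.mem_append.mp hw with hv | hcn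
      · simp [(cmLoop_iff cmModalVerbs s).mpr ⟨w, hv, hinf⟩]
      · split_ifs with h1 h2
        · rfl
        · rfl
        · exact absurd ((cmLoop_iff cmModalContractions s).mpr ⟨w, hcn, hinf⟩) h2
  by_cases hb : contains_modal_alt s = true
  · rw [hb, hA.mpr (hB.mp hb)]
  · have hb' : contains_modal_alt s = false := by simpa using hb
    have ha : contains_modal s = false := by
      cases hx : contains_modal s
      · rfl
      · exact absurd (hB.mpr (hA.mp hx)) hb
    rw [ha, hb']

-- ===== VERDICT (by name: the statement is the Claim_ definition above) =====
theorem contains_modal_spec : Claim_equal_contains_modal := by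
  intro s _
  exact cm_main s
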